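-- pv_equiv track=rewrite | github.com/mami-project/pathspider | pathspider/plugins/udpzero.py | combine_flows
-- ===== SOURCE A (Python) =====
-- def combine_flows(flows):
--     for flow in flows:
--         if not flow['observed']:
--             return []
--
--     if flows[0]['dns_response_valid'] and flows[1]['dns_response_valid']:
--         return ['udpzero.connectivity.works']
--     if flows[0]['dns_response_valid'] and not flows[1]['dns_response_valid']:
--         return ['udpzero.connectivity.broken']
--     if not flows[0]['dns_response_valid'] and flows[1]['dns_response_valid']:
--         return ['udpzero.connectivity.transient']
--     else:
--         return ['udpzero.connectivity.offline']
-- ===== SOURCE B (Python) =====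
-- def combine_flows(flows):
--     return _check(flows, flows)
--
--
-- def _check(rest, flows):
--     # Recursively verify every flow was observed, then build the verdict name.
--     if rest:
--         if not rest[0]['observed']:
--             return []
--         return _check(rest[1:], flows)
--     a = flows[0]['dns_response_valid']
--     b = flows[1]['dns_response_valid']
--     word = ('works' if b else 'broken') if a else ('transient' if b else 'offline')
--     return ['udpzero.connectivity.' + word]
-- ===== Notes on version B (the rewrite author's own statement) =====
-- stated objective: alternative
-- what changed: Replaces the iterative observed-loop plus flat four-branch cascade (which re-tests both booleans in each branch) by a recursive guard over the flow list whose base case builds the verdict string by concatenating a nested-conditional suffix onto the common 'udpzero.connectivity.' prefix.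
import Mathlib
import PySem

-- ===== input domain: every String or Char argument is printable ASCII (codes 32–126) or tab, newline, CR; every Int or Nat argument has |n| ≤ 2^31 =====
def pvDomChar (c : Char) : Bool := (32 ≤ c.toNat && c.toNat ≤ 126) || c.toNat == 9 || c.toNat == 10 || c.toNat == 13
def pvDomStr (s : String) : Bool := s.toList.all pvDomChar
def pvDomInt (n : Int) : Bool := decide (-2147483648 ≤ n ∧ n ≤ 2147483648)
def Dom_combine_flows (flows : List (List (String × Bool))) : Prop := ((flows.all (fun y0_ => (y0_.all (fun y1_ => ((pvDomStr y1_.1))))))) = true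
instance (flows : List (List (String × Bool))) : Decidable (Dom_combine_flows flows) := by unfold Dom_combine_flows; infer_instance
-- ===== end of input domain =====

-- ===== PORT A =====
-- B replaces A's loop + flat four-branch cascade by a recursive observed-guard whose
-- base case concatenates a nested-conditional suffix onto a common prefix; return values agree.
-- loop 'for flow in flows: if not flow['observed']: return []' (true = fell through)
def combineAObs : List (List (String × Bool)) → Bool
  | [] => true
  | f :: rest =>
    if !(((PySem.Dict.ofList f).get? "observed").getD false) then false
    else combineAObs rest

def combine_flows (flows : List (List (String × Bool))) : List String :=
  if combineAObs flows = false then []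
  else
    let a := ((PySem.Dict.ofList ((PySem.List.pyGet? flows 0).getD [])).get? "dns_response_valid").getD false
    let b := ((PySem.Dict.ofList ((PySem.List.pyGet? flows 1).getD [])).get? "dns_response_valid").getD false
    if a && b then ["udpzero.connectivity.works"]
    else if a && !b then ["udpzero.connectivity.broken"]
    else if !a && b then ["udpzero.connectivity.transient"]
    else ["udpzero.connectivity.offline"]

-- ===== PORT B =====
-- recursive helper _check(rest, flows); 'rest[1:]' of a nonempty list is its tail
def combineBCheck : List (List (String × Bool)) → List (List (String × Bool)) → List String
  | r :: rest, flows =>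
    if !(((PySem.Dict.ofList r).get? "observed").getD false) then []
    else combineBCheck rest flows
  | [], flows =>
    let a := ((PySem.Dict.ofList ((PySem.List.pyGet? flows 0).getD [])).get? "dns_response_valid").getD false
    let b := ((PySem.Dict.ofList ((PySem.List.pyGet? flows 1).getD [])).get? "dns_response_valid").getD false
    let word := if a then (if b then "works" else "broken")
                else (if b then "transient" else "offline")
    ["udpzero.connectivity." ++ word]

def combine_flows_alt (flows : List (List (String × Bool))) : List String :=
  combineBCheck flows flows

-- ===== PRECONDITION & SPEC =====
-- Pre_ excludes exactly the inputs where A raises: a KeyError on 'observed' at the first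
-- flow not observed-true, or (all flows observed-true) an IndexError on flows[0]/flows[1]
-- or a KeyError on 'dns_response_valid' there.
def Pre_combine_flows (flows : List (List (String × Bool))) : Prop :=
  let rest := flows.dropWhile (fun f => (PySem.Dict.ofList f).get? "observed" == some true)
  if rest.isEmpty then
    2 ≤ flows.length ∧
    ((PySem.Dict.ofList ((PySem.List.pyGet? flows 0).getD [])).get? "dns_response_valid").isSome = true ∧
    ((PySem.Dict.ofList ((PySem.List.pyGet? flows 1).getD [])).get? "dns_response_valid").isSome = true
  else rest.head?.any (fun f => (PySem.Dict.ofList f).get? "observed" == some false) = true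
instance (flows : List (List (String × Bool))) : Decidable (Pre_combine_flows flows) := by
  unfold Pre_combine_flows; infer_instance

def pvWitness_combine_flows : (List (List (String × Bool))) :=
  [[("observed", true), ("dns_response_valid", true)],
   [("observed", true), ("dns_response_valid", false)]]

def Spec_combine_flows (flows : List (List (String × Bool))) (out : List String) : Prop := out = combine_flows_alt flows
instance (flows : List (List (String × Bool))) (out : List String) : Decidable (Spec_combine_flows flows out) := by unfold Spec_combine_flows; infer_instance

-- ===== CLAIM =====
def Claim_equal_combine_flows : Prop := ∀ (flows : List (List (String × Bool))), Dom_combine_flows flows → Pre_combine_flows flows → Spec_combine_flows flows (combine_flows flows)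

-- ===== LEMMAS AND PROOFS =====
theorem combineBCheck_eq (rest flows : List (List (String × Bool))) :
    combineBCheck rest flows =
      if combineAObs rest = false then [] else combineBCheck [] flows := by
  induction rest with
  | nil => rfl
  | cons f r ih =>
    simp only [combineBCheck, combineAObs, ih]
    cases ((PySem.Dict.ofList f).get? "observed").getD false <;> simp

theorem combine_flows_eq_alt (flows : List (List (String × Bool))) :
    combine_flows flows = combine_flows_alt flows := by
  rw [combine_flows_alt, combineBCheck_eq]
  simp only [combine_flows, combineBCheck]
  cases h : combineAObs flows <;>
    cases ((PySem.Dict.ofList ((PySem.List.pyGet? flows 0).getD [])).get? "dns_response_valid").getD false <;>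
    cases ((PySem.Dict.ofList ((PySem.List.pyGet? flows 1).getD [])).get? "dns_response_valid").getD false <;>
    rfl

-- ===== VERDICT =====
theorem combine_flows_spec : Claim_equal_combine_flows := by
  intro flows _ _
  exact combine_flows_eq_alt flows
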